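-- pv_equiv track=rewrite | github.com/Forlin12/Dissertacao | main.py | analisar_cenario
-- ===== SOURCE A (Python) =====
-- def analisar_cenario(caminho_temporal):
--     esperas, mudancas_camada = 0, 0
--     movimentos = 0
--     for i in range(1, len(caminho_temporal)):
--         p1, p2 = caminho_temporal[i - 1], caminho_temporal[i]
--         if p1 == p2:
--             esperas += 1
--         else:
--             movimentos += 1
--             if len(p1) == 3 and len(p2) == 3 and p1[2] != p2[2]:
--                 mudancas_camada += 1
--     return movimentos, esperas, mudancas_camada
-- ===== SOURCE B (Python) =====
-- def analisar_cenario(caminho_temporal):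
--     # Run-length compress the path: consecutive equal positions collapse into one run.
--     runs = []
--     for p in caminho_temporal:
--         if not runs or runs[-1] != p:
--             runs.append(p)
--     # Each run boundary is one movement; everything collapsed was a wait.
--     movimentos = len(runs) - 1 if runs else 0
--     esperas = len(caminho_temporal) - len(runs)
--     # Adjacent runs are distinct by construction, so no equality test is needed.
--     mudancas_camada = sum(
--         1 for a, b in zip(runs, runs[1:])
--         if len(a) == 3 and len(b) == 3 and a[2] != b[2]
--     )
--     return movimentos, esperas, mudancas_camada
-- ===== Notes on version B (the rewrite author's own statement) =====
-- stated objective: alternative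
-- what changed: B first run-length-compresses the path into maximal runs of equal positions, then derives movimentos = len(runs)-1 and esperas = len(path)-len(runs) arithmetically and counts layer changes over adjacent runs (which are distinct by construction, so the compare-adjacent-pairs predicate of A disappears).
import Mathlib
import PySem

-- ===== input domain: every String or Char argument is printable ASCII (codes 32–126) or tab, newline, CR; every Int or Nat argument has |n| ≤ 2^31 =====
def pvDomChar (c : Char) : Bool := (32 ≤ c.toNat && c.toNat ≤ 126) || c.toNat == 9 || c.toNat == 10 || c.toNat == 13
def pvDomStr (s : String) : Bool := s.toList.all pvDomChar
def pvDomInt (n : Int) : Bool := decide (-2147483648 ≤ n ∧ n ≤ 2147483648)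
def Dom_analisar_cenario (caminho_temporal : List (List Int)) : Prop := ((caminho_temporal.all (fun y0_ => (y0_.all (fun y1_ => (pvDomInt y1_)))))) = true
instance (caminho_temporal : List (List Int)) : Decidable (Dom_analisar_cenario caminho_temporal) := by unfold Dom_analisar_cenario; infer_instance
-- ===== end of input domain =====

-- B run-length-compresses the path into runs and derives all three counts from the
-- run list, instead of A's single indexed loop with three counters (objective: alternative).

-- ===== PORT A =====
-- literal transliteration of A's indexed loop; the indices i-1, i are always in range,
-- so pyGetD with default [] is exact.
def analisar_cenario (caminho_temporal : List (List Int)) : Int × Int × Int :=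
  let st := (PySem.List.pyRange 1 (caminho_temporal.length : Int) 1).foldl
    (fun (s : Int × Int × Int) i =>
      let p1 := PySem.List.pyGetD caminho_temporal (i - 1) []
      let p2 := PySem.List.pyGetD caminho_temporal i []
      if p1 = p2 then (s.1 + 1, s.2.1, s.2.2)
      else if (p1.length : Int) = 3 ∧ (p2.length : Int) = 3 ∧
              PySem.List.pyGetD p1 2 0 ≠ PySem.List.pyGetD p2 2 0 then
        (s.1, s.2.1 + 1, s.2.2 + 1)
      else (s.1, s.2.1, s.2.2 + 1))
    (0, 0, 0)
  (st.2.2, st.1, st.2.1)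

-- ===== PORT B =====
-- Source B's loop appending to `runs` is this foldl; `runs[-1]` is getLast?.
def analisar_cenario_alt (caminho_temporal : List (List Int)) : Int × Int × Int :=
  let runs := caminho_temporal.foldl
    (fun (runs : List (List Int)) p =>
      if runs = [] ∨ runs.getLast? ≠ some p then runs ++ [p] else runs) []
  let movimentos : Int := if runs = [] then 0 else (runs.length : Int) - 1
  let esperas : Int := (caminho_temporal.length : Int) - (runs.length : Int)
  let mudancas_camada : Int := ((runs.zip runs.tail).countP (fun p =>
      (p.1.length : Int) = 3 ∧ (p.2.length : Int) = 3 ∧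
      PySem.List.pyGetD p.1 2 0 ≠ PySem.List.pyGetD p.2 2 0) : Nat)
  (movimentos, esperas, mudancas_camada)

-- ===== PRECONDITION & SPEC =====
def Spec_analisar_cenario (caminho_temporal : List (List Int)) (out : Int × Int × Int) : Prop := out = analisar_cenario_alt caminho_temporal
instance (caminho_temporal : List (List Int)) (out : Int × Int × Int) : Decidable (Spec_analisar_cenario caminho_temporal out) := by unfold Spec_analisar_cenario; infer_instance

-- ===== CLAIM (what is proved, stated in full; the proofs are below) =====
def Claim_equal_analisar_cenario : Prop := ∀ (caminho_temporal : List (List Int)), Dom_analisar_cenario caminho_temporal → Spec_analisar_cenario caminho_temporal (analisar_cenario caminho_temporal)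

-- ===== LEMMAS AND PROOFS =====

-- The tail of the run list after a run headed by l, built front-to-back.
def pvTail (l : List Int) : List (List Int) → List (List Int)
  | [] => []
  | p :: t => if p = l then pvTail l t else p :: pvTail p t

-- Source B's append-at-the-end loop computes acc ++ pvTail of the last element.
lemma pv_fold_runs (xs : List (List Int)) :
    ∀ (l : List Int) (acc : List (List Int)),
    xs.foldl (fun (runs : List (List Int)) p =>
        if runs = [] ∨ runs.getLast? ≠ some p then runs ++ [p] else runs)
      (acc ++ [l]) = (acc ++ [l]) ++ pvTail l xs := by
  induction xs with
  | nil => intro l acc; simp [pvTail]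
  | cons p t ih =>
    intro l acc
    simp only [List.foldl_cons, pvTail]
    by_cases h : p = l
    · subst h
      simp [ih]
    · rw [if_pos (by
        refine Or.inr ?_
        simp only [List.getLast?_append, List.getLast?_singleton, Option.or_some]
        exact fun e => h ((Option.some.injEq _ _).mp e).symm)]
      have := ih p (acc ++ [l])
      simp only [List.append_assoc] at this ⊢
      rw [this]
      simp [h]

-- waits in the original path = elements absorbed by the compression.
lemma pv_tail_len (t : List (List Int)) :
    ∀ x : List Int,
    ((x :: t).zip t).countP (fun p => p.1 = p.2) + (pvTail x t).length = t.length := by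
  induction t with
  | nil => intro x; simp [pvTail]
  | cons y t' ih =>
    intro x
    have hy := ih y
    simp only [List.zip_cons_cons, List.countP_cons, pvTail, List.length_cons]
    by_cases h : y = x
    · subst h
      rw [if_pos rfl]
      simp only [List.length_cons]
      norm_num
      omega
    · rw [if_neg h]
      have hne : ¬ x = y := fun e => h e.symm
      simp [hne]
      omega

-- layer changes over adjacent runs = layer changes over distinct adjacent path pairs.
lemma pv_tail_mud (t : List (List Int)) :
    ∀ x : List Int,
    ((x :: pvTail x t).zip (pvTail x t)).countP (fun p =>
        (p.1.length : Int) = 3 ∧ (p.2.length : Int) = 3 ∧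
        PySem.List.pyGetD p.1 2 0 ≠ PySem.List.pyGetD p.2 2 0) =
    ((x :: t).zip t).countP (fun p =>
        ¬ p.1 = p.2 ∧ (p.1.length : Int) = 3 ∧ (p.2.length : Int) = 3 ∧
        PySem.List.pyGetD p.1 2 0 ≠ PySem.List.pyGetD p.2 2 0) := by
  induction t with
  | nil => intro x; simp [pvTail]
  | cons y t' ih =>
    intro x
    simp only [pvTail, List.zip_cons_cons, List.countP_cons]
    by_cases h : y = x
    · subst h
      rw [if_pos rfl, ih y]
      simp
    · rw [if_neg h]
      simp only [List.zip_cons_cons, List.countP_cons, ih y]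
      have hne : ¬ (x = y) := fun e => h e.symm
      by_cases hm : (x.length : Int) = 3 ∧ (y.length : Int) = 3 ∧
          PySem.List.pyGetD x 2 0 ≠ PySem.List.pyGetD y 2 0 <;>
        simp [hm, hne]

-- (A-side) the indices of A's loop, mapped to the pairs they index, are the adjacent pairs.
lemma pv_map_pairs (xs : List (List Int)) :
    (PySem.List.pyRange 1 (xs.length : Int) 1).map
      (fun i => (PySem.List.pyGetD xs (i - 1) [], PySem.List.pyGetD xs i [])) =
    xs.zip xs.tail := by
  apply List.ext_getElem
  · simp [PySem.List.length_pyRange_one]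
  · intro k h1 h2
    have hk : k < xs.length - 1 := by
      simp [PySem.List.length_pyRange_one] at h1; omega
    have hk1 : k + 1 < xs.length := by omega
    simp only [List.getElem_map, PySem.List.getElem_pyRange_one, List.getElem_zip,
      List.getElem_tail]
    have e1 : ((1 : Int) + k) - 1 = ((k : Nat) : Int) := by push_cast; ring
    have e2 : ((1 : Int) + k) = (((k + 1 : Nat)) : Int) := by push_cast; ring
    rw [e1, e2, PySem.List.pyGetD_natCast, PySem.List.pyGetD_natCast]
    simp [List.getD_eq_getElem?_getD, List.getElem?_eq_getElem, hk1,
      (by omega : k < xs.length)]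

-- (A-side) folding A's body over the pair list yields counts of the two predicates.
lemma pv_fold_counts (l : List (List Int × List Int)) (e m mo : Int) :
    l.foldl
      (fun (s : Int × Int × Int) p =>
        if p.1 = p.2 then (s.1 + 1, s.2.1, s.2.2)
        else if (p.1.length : Int) = 3 ∧ (p.2.length : Int) = 3 ∧
                PySem.List.pyGetD p.1 2 0 ≠ PySem.List.pyGetD p.2 2 0 then
          (s.1, s.2.1 + 1, s.2.2 + 1)
        else (s.1, s.2.1, s.2.2 + 1))
      (e, m, mo) =
    (e + (l.countP (fun p => p.1 = p.2) : Nat),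
     m + (l.countP (fun p =>
        ¬ p.1 = p.2 ∧ (p.1.length : Int) = 3 ∧ (p.2.length : Int) = 3 ∧
        PySem.List.pyGetD p.1 2 0 ≠ PySem.List.pyGetD p.2 2 0) : Nat),
     mo + ((l.length : Int) - (l.countP (fun p => p.1 = p.2) : Nat))) := by
  induction l generalizing e m mo with
  | nil => simp
  | cons p t ih =>
    simp only [List.foldl_cons, List.countP_cons, List.length_cons]
    by_cases h1 : p.1 = p.2
    · rw [if_pos h1, ih]
      refine Prod.ext ?_ (Prod.ext ?_ ?_) <;> simp [h1] <;> omega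
    · rw [if_neg h1]
      by_cases h2 : (p.1.length : Int) = 3 ∧ (p.2.length : Int) = 3 ∧
          PySem.List.pyGetD p.1 2 0 ≠ PySem.List.pyGetD p.2 2 0
      · rw [if_pos h2, ih]
        refine Prod.ext ?_ (Prod.ext ?_ ?_) <;> simp [h1, h2] <;> omega
      · rw [if_neg h2, ih]
        refine Prod.ext ?_ (Prod.ext ?_ ?_) <;> simp [h1, h2] <;> omega

-- ===== VERDICT (by name: the statement is the Claim_ definition above) =====
theorem analisar_cenario_spec : Claim_equal_analisar_cenario := by
  intro xs _
  unfold Spec_analisar_cenario analisar_cenario analisar_cenario_alt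
  have hfold :
      (PySem.List.pyRange 1 (xs.length : Int) 1).foldl
        (fun (s : Int × Int × Int) i =>
          let p1 := PySem.List.pyGetD xs (i - 1) []
          let p2 := PySem.List.pyGetD xs i []
          if p1 = p2 then (s.1 + 1, s.2.1, s.2.2)
          else if (p1.length : Int) = 3 ∧ (p2.length : Int) = 3 ∧
                  PySem.List.pyGetD p1 2 0 ≠ PySem.List.pyGetD p2 2 0 then
            (s.1, s.2.1 + 1, s.2.2 + 1)
          else (s.1, s.2.1, s.2.2 + 1))
        (0, 0, 0) =
      ((PySem.List.pyRange 1 (xs.length : Int) 1).map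
        (fun i => (PySem.List.pyGetD xs (i - 1) [], PySem.List.pyGetD xs i []))).foldl
        (fun (s : Int × Int × Int) p =>
          if p.1 = p.2 then (s.1 + 1, s.2.1, s.2.2)
          else if (p.1.length : Int) = 3 ∧ (p.2.length : Int) = 3 ∧
                  PySem.List.pyGetD p.1 2 0 ≠ PySem.List.pyGetD p.2 2 0 then
            (s.1, s.2.1 + 1, s.2.2 + 1)
          else (s.1, s.2.1, s.2.2 + 1))
        (0, 0, 0) := by
    rw [List.foldl_map]
  rw [hfold, pv_map_pairs, pv_fold_counts]
  cases xs with
  | nil => simp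
  | cons x t =>
    have hruns : (x :: t).foldl
        (fun (runs : List (List Int)) p =>
          if runs = [] ∨ runs.getLast? ≠ some p then runs ++ [p] else runs) [] =
        x :: pvTail x t := by
      simp only [List.foldl_cons, if_pos (Or.inl rfl)]
      have := pv_fold_runs t x []
      simpa using this
    simp only [hruns, List.tail_cons]
    have hlen := pv_tail_len t x
    have hmud := pv_tail_mud t x
    have hzl : ((x :: t).zip t).length = t.length := by simp
    simp only [Prod.mk.injEq]
    refine ⟨?_, ?_, ?_⟩
    · rw [if_neg (by simp : ¬ (x :: pvTail x t = []))]
      simp only [List.length_cons, hzl] at *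
      push_cast
      omega
    · simp only [List.length_cons] at *
      push_cast
      omega
    · rw [hmud]
      omega
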